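-- pv_equiv track=rewrite | github.com/Hazza4569/tournament-scheduler | output.py | EnergyLoss
-- ===== SOURCE A (Python) =====
-- def EnergyLoss( team_frequency ):
--     # measure for how tiring a schedule would be on a team. Multiple games in a row
--     # are punished by increasing the energy spend of adjacent games. Sufficient break
--     # will reduce the energy gradient back to 1
--     energy_spent = 0
--     energy_gradient = 1
--     for game in team_frequency:
--         if game:
--             energy_spent += energy_gradient
--             energy_gradient += 3
--         else:
--             energy_gradient = max(energy_gradient-4, 1)
--     return energy_spent
-- ===== SOURCE B (Python) =====
-- def EnergyLoss(team_frequency):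
--     # Segment-wise: split the schedule into maximal runs of games / rests and
--     # apply a closed form per run instead of updating state per element.
--     energy = 0
--     g = 1
--     i = 0
--     n = len(team_frequency)
--     while i < n:
--         playing = bool(team_frequency[i])
--         j = i + 1
--         while j < n and bool(team_frequency[j]) == playing:
--             j += 1
--         k = j - i
--         if playing:
--             energy += k * g + 3 * (k - 1) * k // 2
--             g += 3 * k
--         else:
--             g = max(g - 4 * k, 1)
--         i = j
--     return energy
-- ===== Notes on version B (the rewrite author's own statement) =====
-- stated objective: alternative
-- what changed: Replaces the per-element stateful loop with a run-based scan: each maximal run of games or rests is handled by one closed-form update (k*g + 3*(k-1)*k//2 for games, max(g-4k,1) for rests).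
import Mathlib
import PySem

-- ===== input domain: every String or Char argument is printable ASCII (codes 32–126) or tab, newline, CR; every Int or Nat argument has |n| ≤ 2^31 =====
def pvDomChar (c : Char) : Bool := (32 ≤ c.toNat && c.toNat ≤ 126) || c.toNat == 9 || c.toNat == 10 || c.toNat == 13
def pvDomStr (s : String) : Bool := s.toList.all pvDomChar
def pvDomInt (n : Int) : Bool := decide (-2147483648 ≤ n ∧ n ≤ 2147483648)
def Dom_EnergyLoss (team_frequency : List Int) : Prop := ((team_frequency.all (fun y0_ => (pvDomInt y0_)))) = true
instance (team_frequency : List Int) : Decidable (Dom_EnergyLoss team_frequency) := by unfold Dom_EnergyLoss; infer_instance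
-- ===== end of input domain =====

-- B replaces A's per-element stateful loop by a run-based scan with one closed-form update per maximal run (alternative decomposition, same cost).

-- ===== PORT A =====
def EnergyLoss (team_frequency : List Int) : Int :=
  (team_frequency.foldl
    (fun (s : Int × Int) game =>
      if game ≠ 0 then (s.1 + s.2, s.2 + 3) else (s.1, max (s.2 - 4) 1))
    (0, 1)).1

-- ===== PORT B =====
-- outer while loop of Source B: each step consumes one maximal run
def EnergyLossAltLoop (l : List Int) (energy g : Int) : Int :=
  match l with
  | [] => energy
  | x :: xs =>
    let playing := decide (x ≠ 0)
    let k : Int := 1 + (xs.takeWhile (fun y => decide (y ≠ 0) == playing)).length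
    if playing then
      EnergyLossAltLoop (xs.dropWhile (fun y => decide (y ≠ 0) == playing))
        (energy + k * g + PySem.Int.floordiv (3 * (k - 1) * k) 2) (g + 3 * k)
    else
      EnergyLossAltLoop (xs.dropWhile (fun y => decide (y ≠ 0) == playing))
        energy (max (g - 4 * k) 1)
termination_by l.length
decreasing_by
  all_goals exact Nat.lt_succ_of_le (List.length_dropWhile_le _ _)

def EnergyLoss_alt (team_frequency : List Int) : Int :=
  EnergyLossAltLoop team_frequency 0 1

-- ===== PRECONDITION & SPEC =====
def Spec_EnergyLoss (team_frequency : List Int) (out : Int) : Prop := out = EnergyLoss_alt team_frequency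
instance (team_frequency : List Int) (out : Int) : Decidable (Spec_EnergyLoss team_frequency out) := by unfold Spec_EnergyLoss; infer_instance

-- ===== CLAIM (what is proved, stated in full; the proofs are below) =====
def Claim_equal_EnergyLoss : Prop := ∀ (team_frequency : List Int), Dom_EnergyLoss team_frequency → Spec_EnergyLoss team_frequency (EnergyLoss team_frequency)

-- ===== LEMMAS AND PROOFS =====

-- A's loop body, named for the proofs
def pvStep (s : Int × Int) (game : Int) : Int × Int :=
  if game ≠ 0 then (s.1 + s.2, s.2 + 3) else (s.1, max (s.2 - 4) 1)

-- triangular-style sum 0 + 3 + 6 + ... + 3*(k-1)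
def pvTri : Nat → Int
  | 0 => 0
  | k+1 => pvTri k + 3 * k

theorem pvEnergyLoss_eq_foldl (l : List Int) :
    EnergyLoss l = (l.foldl pvStep (0, 1)).1 := rfl

theorem pvTri_eq (k : Nat) :
    pvTri k = PySem.Int.floordiv (3 * ((k : Int) - 1) * (k : Int)) 2 := by
  induction k with
  | zero =>
    rw [PySem.Int.floordiv_eq_ediv_of_pos (by norm_num)]
    simp [pvTri]
  | succ k ih =>
    have hstep : 3 * (((k + 1 : Nat) : Int) - 1) * ((k + 1 : Nat) : Int)
        = 3 * ((k : Int) - 1) * (k : Int) + 3 * (k : Int) * 2 := by push_cast; ring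
    rw [PySem.Int.floordiv_eq_ediv_of_pos (by norm_num), hstep,
        Int.add_mul_ediv_right _ _ (by norm_num : (2:Int) ≠ 0)]
    rw [PySem.Int.floordiv_eq_ediv_of_pos (by norm_num)] at ih
    simp [pvTri, ← ih]

-- a run of games: closed form for A's fold
theorem pvFold_truthy (ts : List Int) (e g : Int) (h : ∀ y ∈ ts, y ≠ 0) :
    ts.foldl pvStep (e, g)
      = (e + (ts.length : Int) * g + pvTri ts.length, g + 3 * (ts.length : Int)) := by
  induction ts generalizing e g with
  | nil => simp [pvTri]
  | cons x xs ih =>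
    have hx : x ≠ 0 := h x (by simp)
    have hrest : ∀ y ∈ xs, y ≠ 0 := fun y hy => h y (by simp [hy])
    simp only [List.foldl_cons, pvStep, if_pos hx, ih _ _ hrest, List.length_cons, pvTri,
      Prod.mk.injEq]
    constructor
    · push_cast; ring
    · push_cast; ring

-- a run of rests: collapses to one max (needs the invariant 1 ≤ g)
theorem pvFold_falsy (ts : List Int) (e g : Int) (h : ∀ y ∈ ts, y = 0) (hg : 1 ≤ g) :
    ts.foldl pvStep (e, g) = (e, max (g - 4 * (ts.length : Int)) 1) := by
  induction ts generalizing g with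
  | nil => simp; omega
  | cons x xs ih =>
    have hx : x = 0 := h x (by simp)
    have hrest : ∀ y ∈ xs, y = 0 := fun y hy => h y (by simp [hy])
    simp only [List.foldl_cons, pvStep, if_neg (not_not_intro hx),
      ih _ hrest (le_max_right _ _), List.length_cons, Prod.mk.injEq]
    refine ⟨trivial, ?_⟩
    push_cast
    omega

theorem pvSplitFold (x : Int) (xs : List Int) (q : Int → Bool) (s : Int × Int) :
    (x :: xs).foldl pvStep s
      = (xs.dropWhile q).foldl pvStep ((x :: xs.takeWhile q).foldl pvStep s) := by
  conv_lhs => rw [show x :: xs = (x :: xs.takeWhile q) ++ xs.dropWhile q by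
    rw [List.cons_append]; congr 1; exact (List.takeWhile_append_dropWhile).symm]
  rw [List.foldl_append]

theorem pvLenCast (x : Int) (ts : List Int) :
    (((x :: ts).length : Nat) : Int) = 1 + (ts.length : Int) := by
  simp [List.length_cons]; ring

theorem pvMain (l : List Int) (e g : Int) (hg : 1 ≤ g) :
    (l.foldl pvStep (e, g)).1 = EnergyLossAltLoop l e g := by
  induction hN : l.length using Nat.strong_induction_on generalizing l e g with
  | _ N ih =>
  match l with
  | [] => simp [EnergyLossAltLoop]
  | x :: xs =>
    by_cases hx : x ≠ 0
    · -- a run of games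
      have hpd : decide (x ≠ 0) = true := decide_eq_true hx
      have htr : ∀ y ∈ x :: xs.takeWhile (fun y => decide (y ≠ 0) == true), y ≠ 0 := by
        intro y hy
        rcases List.mem_cons.1 hy with h | h
        · exact h ▸ hx
        · have := List.mem_takeWhile_imp h
          simpa using this
      have hlen : (xs.dropWhile (fun y => decide (y ≠ 0) == true)).length < N := by
        subst hN
        exact Nat.lt_succ_of_le (List.length_dropWhile_le _ _)
      rw [EnergyLossAltLoop]
      simp only [hpd, if_true]
      rw [pvSplitFold x xs (fun y => decide (y ≠ 0) == true),
        pvFold_truthy _ e g htr,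
        ih _ hlen _ _ _ (by
          have : (0:Int) ≤ ((x :: xs.takeWhile (fun y => decide (y ≠ 0) == true)).length : Int) := by
            positivity
          omega) rfl]
      rw [pvTri_eq, pvLenCast]
    · -- a run of rests
      push_neg at hx
      have hpd : decide (x ≠ 0) = false := by simp [hx]
      have hfa : ∀ y ∈ x :: xs.takeWhile (fun y => decide (y ≠ 0) == false), y = 0 := by
        intro y hy
        rcases List.mem_cons.1 hy with h | h
        · exact h ▸ hx
        · have := List.mem_takeWhile_imp h
          simpa using this
      have hlen : (xs.dropWhile (fun y => decide (y ≠ 0) == false)).length < N := by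
        subst hN
        exact Nat.lt_succ_of_le (List.length_dropWhile_le _ _)
      rw [EnergyLossAltLoop]
      simp only [hpd, Bool.false_eq_true, if_false]
      rw [pvSplitFold x xs (fun y => decide (y ≠ 0) == false),
        pvFold_falsy _ e g hfa hg,
        ih _ hlen _ _ _ (le_max_right _ _) rfl]
      rw [pvLenCast]

-- ===== VERDICT (by name: the statement is the Claim_ definition above) =====
theorem EnergyLoss_spec : Claim_equal_EnergyLoss := by
  intro l _
  show EnergyLoss l = EnergyLoss_alt l
  rw [pvEnergyLoss_eq_foldl, EnergyLoss_alt, pvMain _ _ _ le_rfl]
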